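-- pv_equiv track=rewrite | github.com/PancrePal-xiaoyibao/kb_upload_genie | backend/app/utils/tracker_utils.py | validate_tracker_id
-- ===== SOURCE A (Python) =====
-- def validate_tracker_id(tracker_id: str) -> bool:
--     """
--     验证跟踪ID格式是否有效
--
--     Args:
--         tracker_id: 要验证的跟踪ID
--
--     Returns:
--         bool: 是否有效
--     """
--     if not tracker_id:
--         return False
--
--     # 检查长度（应该在8-36字符之间）
--     if len(tracker_id) < 8 or len(tracker_id) > 36:
--         return False
--
--     # 检查是否包含有效字符（字母、数字、短横线）
--     valid_chars = set('ABCDEFGHIJKLMNOPQRSTUVWXYZ0123456789-')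
--     if not all(c in valid_chars for c in tracker_id.upper()):
--         return False
--
--     return True
-- ===== SOURCE B (Python) =====
-- _OK = "ABCDEFGHIJKLMNOPQRSTUVWXYZabcdefghijklmnopqrstuvwxyz0123456789-"
--
-- def validate_tracker_id(tracker_id: str) -> bool:
--     # Valid iff the length is 8..36 and stripping every valid character
--     # (both cases, so no .upper() pass is needed) from both ends leaves nothing:
--     # strip() peels from each end and stops at the first invalid character, so
--     # the residue is empty exactly when all characters are valid.
--     return 8 <= len(tracker_id) <= 36 and not tracker_id.strip(_OK)
-- ===== Notes on version B (the rewrite author's own statement) =====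
-- stated objective: idiomatic
-- what changed: drops the .upper() pass and the per-character all()-membership scan entirely: B checks the length and then str.strip() with the valid alphabet in both cases, which peels valid characters from the two ends and yields an empty residue exactly when every character is valid
import Mathlib
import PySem

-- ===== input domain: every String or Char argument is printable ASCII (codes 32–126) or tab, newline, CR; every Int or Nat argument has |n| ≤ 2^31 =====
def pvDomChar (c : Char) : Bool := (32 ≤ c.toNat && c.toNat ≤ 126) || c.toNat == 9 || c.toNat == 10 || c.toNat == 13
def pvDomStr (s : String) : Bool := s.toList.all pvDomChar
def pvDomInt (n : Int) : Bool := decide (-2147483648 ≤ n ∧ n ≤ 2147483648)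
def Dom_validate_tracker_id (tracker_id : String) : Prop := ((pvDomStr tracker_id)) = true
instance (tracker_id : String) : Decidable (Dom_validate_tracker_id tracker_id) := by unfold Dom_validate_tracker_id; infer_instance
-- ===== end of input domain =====

-- B drops A's .upper() pass and per-character all() scan: it checks the length and
-- strips the valid alphabet (both cases) from both ends, accepting iff the residue is
-- empty (idiomatic, same cost).


-- ===== PORT A =====
def pvValidChars : List Char := "ABCDEFGHIJKLMNOPQRSTUVWXYZ0123456789-".toList

def validate_tracker_id (tracker_id : String) : Bool :=
  if PySem.Str.len tracker_id = 0 then false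
  else if PySem.Str.len tracker_id < 8 ∨ PySem.Str.len tracker_id > 36 then false
  else if ¬ ((PySem.Str.upper tracker_id).toList.all
      (fun c => PySem.Set.contains (PySem.Set.ofList pvValidChars) c)) then false
  else true

-- ===== PORT B =====
def pvOkChars : String := "ABCDEFGHIJKLMNOPQRSTUVWXYZabcdefghijklmnopqrstuvwxyz0123456789-"

def validate_tracker_id_alt (tracker_id : String) : Bool :=
  decide (8 ≤ PySem.Str.len tracker_id ∧ PySem.Str.len tracker_id ≤ 36) &&
    (PySem.Str.len (PySem.Str.stripChars tracker_id pvOkChars) = 0)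

-- ===== PRECONDITION & SPEC =====
def Spec_validate_tracker_id (tracker_id : String) (out : Bool) : Prop := out = validate_tracker_id_alt tracker_id
instance (tracker_id : String) (out : Bool) : Decidable (Spec_validate_tracker_id tracker_id out) := by unfold Spec_validate_tracker_id; infer_instance

-- ===== CLAIM (what is proved, stated in full; the proofs are below) =====
def Claim_equal_validate_tracker_id : Prop := ∀ (tracker_id : String), Dom_validate_tracker_id tracker_id → Spec_validate_tracker_id tracker_id (validate_tracker_id tracker_id)

-- ===== LEMMAS AND PROOFS =====

-- all over the same list is determined by pointwise-equal predicates
theorem all_congr_mem {p q : Char → Bool} {l : List Char} (h : ∀ x ∈ l, p x = q x) :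
    l.all p = l.all q := by
  induction l with
  | nil => rfl
  | cons a t ih => simp only [List.all_cons, h a (by simp), ih (fun x hx => h x (by simp [hx]))]

-- stripping a character set leaves nothing iff every character is in the set
theorem strip_nil_iff (v l : List Char) :
    PySem.Chars.stripChars l v = [] ↔ ∀ c ∈ l, v.contains c := by
  unfold PySem.Chars.stripChars
  rw [List.reverse_eq_nil_iff, List.dropWhile_eq_nil_iff]
  constructor
  · intro h c hc
    rcases hdw : List.dropWhile (fun c => v.contains c) l with _ | ⟨a, t⟩
    · exact List.dropWhile_eq_nil_iff.mp hdw c hc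
    · exfalso
      have hna := List.head?_dropWhile_not (fun c => v.contains c) l
      rw [hdw] at hna
      have hmem : a ∈ (List.dropWhile (fun c => v.contains c) l).reverse := by
        rw [hdw]; simp
      have := h a hmem
      simp_all
  · intro h x hx
    exact h x ((List.dropWhile_sublist _).subset (List.mem_reverse.mp hx))

-- per-character key fact on ASCII (decided by enumeration over the 128 codes)
set_option maxRecDepth 20000 in
theorem char_key_lt (n : Nat) (h : n < 128) :
    pvValidChars.contains (PySem.Chars.upperChar (Char.ofNat n))
      = pvOkChars.toList.contains (Char.ofNat n) := by
  revert n h; decide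

theorem char_key (c : Char) (h : pvDomChar c = true) :
    pvValidChars.contains (PySem.Chars.upperChar c) = pvOkChars.toList.contains c := by
  have hlt : c.toNat < 128 := by
    unfold pvDomChar at h
    simp only [Bool.or_eq_true, Bool.and_eq_true, decide_eq_true_eq, beq_iff_eq] at h
    omega
  have := char_key_lt c.toNat hlt
  rwa [Char.ofNat_toNat] at this

-- on ASCII strings, A's scan of the uppercased string equals B's membership condition
theorem all_upper_eq (l : List Char) (hd : l.all pvDomChar = true) :
    ((PySem.Chars.upper l).all (fun c => pvValidChars.contains c))
      = (l.all (fun c => pvOkChars.toList.contains c)) := by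
  unfold PySem.Chars.upper
  rw [List.all_map]
  exact all_congr_mem (fun c hc => char_key c (by rw [List.all_eq_true] at hd; exact hd c hc))

-- ===== VERDICT (by name: the statement is the Claim_ definition above) =====
theorem validate_tracker_id_spec : Claim_equal_validate_tracker_id := by
  intro s hdom
  unfold Spec_validate_tracker_id validate_tracker_id validate_tracker_id_alt
  have hstrip : (PySem.Str.len (PySem.Str.stripChars s pvOkChars) = 0)
      ↔ (∀ c ∈ s.toList, pvOkChars.toList.contains c) := by
    rw [PySem.Str.len_eq, PySem.Str.toList_stripChars, Int.natCast_eq_zero,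
      List.length_eq_zero_iff]
    exact strip_nil_iff pvOkChars.toList s.toList
  have hall : ((PySem.Str.upper s).toList.all
      (fun c => PySem.Set.contains (PySem.Set.ofList pvValidChars) c))
      = (s.toList.all (fun c => pvOkChars.toList.contains c)) := by
    rw [PySem.Str.toList_upper, ← all_upper_eq s.toList hdom]
    exact all_congr_mem (fun c _ => by simp [PySem.Set.contains, PySem.Set.mem_ofList])
  rcases hb : s.toList.all (fun c => pvOkChars.toList.contains c) with _ | _
  · have hne : ¬ (PySem.Str.len (PySem.Str.stripChars s pvOkChars) = 0) := by
      rw [hstrip, ← List.all_eq_true]; simp [hb]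
    rw [hall, hb]
    rw [decide_eq_false hne]
    simp
  · have hyes : (PySem.Str.len (PySem.Str.stripChars s pvOkChars) = 0) := by
      rw [hstrip, ← List.all_eq_true]; simp [hb]
    rw [hall, hb]
    simp only [hyes, decide_true, Bool.and_true]
    split_ifs with h1 h2 <;> simp_all <;> omega
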